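-- pv_equiv track=rewrite | github.com/capstone-project-team06/AI | app/services/clothes_analyzer.py | _same_color_family
-- ===== SOURCE A (Python) =====
-- from typing import Dict, Any, List, Optional
--
-- def _normalize(s: Optional[str]) -> str:
--     return (s or "").strip().lower()
--
-- def _same_color_family(a: str, b: str) -> bool:
--     a = _normalize(a)
--     b = _normalize(b)
--     groups = [
--         {"white", "ivory", "beige", "cream"},
--         {"black", "charcoal"},
--         {"gray", "grey"},
--         {"navy", "blue"},
--         {"brown", "khaki"},
--         {"pink", "red"},
--         {"green", "olive"},
--     ]
--     for g in groups:
--         if a in g and b in g: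
--             return True
--     return False
-- ===== SOURCE B (Python) =====
-- # B: one flat precomputed color->family-id table; two O(1) lookups instead of scanning group sets.
-- _GROUPS = [
--     ("white", "ivory", "beige", "cream"),
--     ("black", "charcoal"),
--     ("gray", "grey"),
--     ("navy", "blue"),
--     ("brown", "khaki"),
--     ("pink", "red"),
--     ("green", "olive"),
-- ]
--
-- _FAMILY = {}
-- for _gid, _g in enumerate(_GROUPS):
--     for _c in _g:
--         _FAMILY[_c] = _gid
--
--
-- def _normalize(s):
--     return (s or "").strip().lower()
--
--
-- def _same_color_family(a: str, b: str) -> bool: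
--     a = _normalize(a)
--     b = _normalize(b)
--     return a in _FAMILY and b in _FAMILY and _FAMILY[a] == _FAMILY[b]
-- ===== Notes on version B (the rewrite author's own statement) =====
-- stated objective: idiomatic
-- what changed: Replaced the per-call scan over seven group sets by a single precomputed flat dict mapping each color to its family id; the function becomes two constant-time lookups and an id comparison.
import Mathlib
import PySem

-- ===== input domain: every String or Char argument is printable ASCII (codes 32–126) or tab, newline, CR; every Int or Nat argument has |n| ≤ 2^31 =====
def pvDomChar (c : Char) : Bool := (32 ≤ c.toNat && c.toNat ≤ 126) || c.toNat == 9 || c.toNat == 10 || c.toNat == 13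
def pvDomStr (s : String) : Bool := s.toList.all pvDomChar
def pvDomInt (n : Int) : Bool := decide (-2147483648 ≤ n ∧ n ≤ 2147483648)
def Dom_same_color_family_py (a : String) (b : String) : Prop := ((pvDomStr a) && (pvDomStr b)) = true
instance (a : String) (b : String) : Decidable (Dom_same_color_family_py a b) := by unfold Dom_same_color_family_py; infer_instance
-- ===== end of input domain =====

-- B replaces A's per-call scan over seven group sets with one precomputed color->id dict and two lookups (idiomatic).

-- shared helper: _normalize(s) = (s or "").strip().lower() — for a str argument, (s or "") = s ("" stays "")
def pyNormalize (s : String) : String := PySem.Str.lower (PySem.Str.strip s)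

-- ===== PORT A =====
def scfGroups : List (PySem.Set String) :=
  [ PySem.Set.ofList ["white", "ivory", "beige", "cream"]
  , PySem.Set.ofList ["black", "charcoal"]
  , PySem.Set.ofList ["gray", "grey"]
  , PySem.Set.ofList ["navy", "blue"]
  , PySem.Set.ofList ["brown", "khaki"]
  , PySem.Set.ofList ["pink", "red"]
  , PySem.Set.ofList ["green", "olive"] ]

-- the 'for g in groups: if a in g and b in g: return True' loop
def scfLoop (a b : String) : List (PySem.Set String) → Bool
  | [] => false
  | g :: rest => if PySem.Set.contains g a && PySem.Set.contains g b then true else scfLoop a b rest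

def same_color_family_py (a : String) (b : String) : Bool :=
  scfLoop (pyNormalize a) (pyNormalize b) scfGroups

-- ===== PORT B =====
-- the module-level table-building loop of Source B: for gid, g in enumerate(groups): for c in g: d[c] = gid
def scfFamily : PySem.Dict String Int :=
  (PySem.List.enumerate
    [ ["white", "ivory", "beige", "cream"]
    , ["black", "charcoal"]
    , ["gray", "grey"]
    , ["navy", "blue"]
    , ["brown", "khaki"]
    , ["pink", "red"]
    , ["green", "olive"] ]).foldl
      (fun d p => p.2.foldl (fun d c => d.insert c p.1) d) PySem.Dict.empty

def same_color_family_py_alt (a : String) (b : String) : Bool :=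
  let a := pyNormalize a
  let b := pyNormalize b
  scfFamily.contains a && scfFamily.contains b &&
    (match scfFamily.get? a, scfFamily.get? b with
     | some u, some v => u == v
     | _, _ => false)

-- ===== PRECONDITION & SPEC =====
def Spec_same_color_family_py (a : String) (b : String) (out : Bool) : Prop := out = same_color_family_py_alt a b
instance (a : String) (b : String) (out : Bool) : Decidable (Spec_same_color_family_py a b out) := by unfold Spec_same_color_family_py; infer_instance

-- ===== CLAIM (what is proved, stated in full; the proofs are below) =====
def Claim_equal_same_color_family_py : Prop := ∀ (a : String) (b : String), Dom_same_color_family_py a b → Spec_same_color_family_py a b (same_color_family_py a b)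

-- ===== LEMMAS AND PROOFS =====

-- the 14 colors occurring in any group
def scfColors : List String :=
  ["white", "ivory", "beige", "cream", "black", "charcoal", "gray", "grey",
   "navy", "blue", "brown", "khaki", "pink", "red", "green", "olive"]

lemma scfLoop_notin (x y : String) (hx : x ∉ scfColors) :
    scfLoop x y scfGroups = false := by
  simp [scfColors] at hx
  obtain ⟨h1, h2, h3, h4, h5, h6, h7, h8, h9, h10, h11, h12, h13, h14, h15, h16⟩ := hx
  simp [scfLoop, scfGroups, PySem.Set.contains, PySem.Set.ofList,
        h1, h2, h3, h4, h5, h6, h7, h8, h9, h10, h11, h12, h13, h14, h15, h16]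

lemma scfFamily_notin (x : String) (hx : x ∉ scfColors) :
    scfFamily.get? x = none := by
  simp [scfColors] at hx
  obtain ⟨h1, h2, h3, h4, h5, h6, h7, h8, h9, h10, h11, h12, h13, h14, h15, h16⟩ := hx
  simp [scfFamily, PySem.List.enumerate, PySem.Dict.get?, PySem.Dict.insert, PySem.Dict.empty,
        Ne.symm h1, Ne.symm h2, Ne.symm h3, Ne.symm h4, Ne.symm h5, Ne.symm h6, Ne.symm h7,
        Ne.symm h8, Ne.symm h9, Ne.symm h10, Ne.symm h11, Ne.symm h12, Ne.symm h13,
        Ne.symm h14, Ne.symm h15, Ne.symm h16]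

lemma scfCore (x y : String) :
    scfLoop x y scfGroups =
      (scfFamily.contains x && scfFamily.contains y &&
        (match scfFamily.get? x, scfFamily.get? y with
         | some u, some v => u == v
         | _, _ => false)) := by
  by_cases hx : x ∈ scfColors
  · by_cases hy : y ∈ scfColors
    · fin_cases hx <;> fin_cases hy <;> decide
    · have h1 := scfFamily_notin y hy
      have h2 : scfFamily.contains y = false := by
        rw [PySem.Dict.contains_eq_isSome_get?, h1]; rfl
      fin_cases hx <;>
        · simp only [h1, h2, Bool.and_false, Bool.false_and]
          simp [scfColors] at hy
          obtain ⟨g1, g2, g3, g4, g5, g6, g7, g8, g9, g10, g11, g12, g13, g14, g15, g16⟩ := hy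
          simp [scfLoop, scfGroups, PySem.Set.contains, PySem.Set.ofList,
                g1, g2, g3, g4, g5, g6, g7, g8, g9, g10, g11, g12, g13, g14, g15, g16]
  · have h1 := scfFamily_notin x hx
    have h2 : scfFamily.contains x = false := by
      rw [PySem.Dict.contains_eq_isSome_get?, h1]; rfl
    rw [scfLoop_notin x y hx]
    simp [h1, h2]

-- ===== VERDICT (by name: the statement is the Claim_ definition above) =====
theorem same_color_family_py_spec : Claim_equal_same_color_family_py := by
  intro a b _
  unfold Spec_same_color_family_py same_color_family_py same_color_family_py_alt
  exact scfCore _ _
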